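-- pv_equiv track=rewrite | github.com/Ifrahtariq2/Leetcode-Solution- | 1537-maximum-score-after-splitting-a-string/maximum-score-after-splitting-a-string.py | maxScore
-- ===== SOURCE A (Python) =====
-- def maxScore(s: str) -> int:
--     maxc = 0
--     for i in range(len(s)-1):
--         lf = s[:i+1]
--         rt = s[i+1:]
--         count = lf.count("0")+rt.count("1")
--         maxc = max(maxc,count)
--     return maxc
-- ===== SOURCE B (Python) =====
-- def maxScore(s: str) -> int:
--     # one pass: running prefix counts instead of recounting both halves per split
--     total_ones = s.count("1")
--     best = 0
--     zeros = 0
--     ones = 0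
--     for c in s[:-1]:
--         if c == "0":
--             zeros += 1
--         if c == "1":
--             ones += 1
--         best = max(best, zeros + total_ones - ones)
--     return best
-- ===== Notes on version B (the rewrite author's own statement) =====
-- stated objective: faster
-- what changed: replaced the per-split recount of both halves (slice + count on every iteration) with a single pass that maintains running prefix zero/one counts against a precomputed total of ones
import Mathlib
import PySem

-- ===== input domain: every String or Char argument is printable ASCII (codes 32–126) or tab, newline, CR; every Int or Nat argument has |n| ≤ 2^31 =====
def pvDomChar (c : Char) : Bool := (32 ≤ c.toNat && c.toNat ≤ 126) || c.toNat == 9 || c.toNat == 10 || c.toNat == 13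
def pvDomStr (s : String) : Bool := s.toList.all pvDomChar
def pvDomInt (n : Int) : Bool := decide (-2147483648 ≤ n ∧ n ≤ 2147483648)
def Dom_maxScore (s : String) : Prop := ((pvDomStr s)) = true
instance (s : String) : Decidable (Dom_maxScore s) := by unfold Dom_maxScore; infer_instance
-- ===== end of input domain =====

-- B replaces A's per-split slice-and-recount with one pass keeping running prefix zero/one counts: O(n) instead of O(n^2).

-- ===== PORT A =====
def maxScore (s : String) : Int :=
  (PySem.List.pyRange 0 (PySem.Str.len s - 1) 1).foldl
    (fun maxc i =>
      let lf := PySem.Str.slice s none (some (i + 1))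
      let rt := PySem.Str.slice s (some (i + 1)) none
      let count : Int := (PySem.Str.count lf "0" : Int) + (PySem.Str.count rt "1" : Int)
      max maxc count) 0

-- ===== PORT B =====
def maxScoreStep (T : Int) (st : Int × Int × Int) (c : Char) : Int × Int × Int :=
  let zeros := if c = '0' then st.2.1 + 1 else st.2.1
  let ones := if c = '1' then st.2.2 + 1 else st.2.2
  (max st.1 (zeros + T - ones), zeros, ones)

def maxScore_alt (s : String) : Int :=
  let T : Int := PySem.Str.count s "1"
  ((PySem.Str.slice s none (some (-1))).toList.foldl (maxScoreStep T) (0, 0, 0)).1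

-- ===== PRECONDITION & SPEC =====
def Spec_maxScore (s : String) (out : Int) : Prop := out = maxScore_alt s
instance (s : String) (out : Int) : Decidable (Spec_maxScore s out) := by unfold Spec_maxScore; infer_instance

-- ===== CLAIM (what is proved, stated in full; the proofs are below) =====
def Claim_equal_maxScore : Prop := ∀ (s : String), Dom_maxScore s → Spec_maxScore s (maxScore s)

-- ===== LEMMAS AND PROOFS =====

-- Python s.count(sub) for a single-character sub is List.count
lemma count_go_single (c : Char) (cs : List Char) (fuel acc : ℕ) (h : cs.length ≤ fuel) :
    PySem.Chars.count.go [c] fuel cs acc = acc + cs.count c := by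
  induction cs generalizing fuel acc with
  | nil => cases fuel <;> simp [PySem.Chars.count.go]
  | cons x t ih =>
    cases fuel with
    | zero => simp at h
    | succ f =>
      have hf : t.length ≤ f := by simpa using h
      simp only [PySem.Chars.count.go]
      by_cases hx : c = x
      · subst hx
        simp [List.isPrefixOf, ih f (acc + 1) hf]
        omega
      · simp [List.isPrefixOf, Ne.symm hx, hx, ih f acc hf]

lemma count_single (c : Char) (cs : List Char) : PySem.Chars.count cs [c] = cs.count c := by
  simp [PySem.Chars.count]
  simpa using count_go_single c cs cs.length 0 le_rfl

-- invariant of B's single pass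
lemma B_inv (xs : List Char) (T best zeros ones : Int) :
    (xs.foldl (maxScoreStep T) (best, zeros, ones)).1
      = (List.range xs.length).foldl
          (fun m k => max m (zeros + ((xs.take (k + 1)).count '0' : Int) + T
              - (ones + ((xs.take (k + 1)).count '1' : Int)))) best := by
  induction xs generalizing best zeros ones with
  | nil => simp
  | cons c xs ih =>
    have hz : (if c = '0' then zeros + 1 else zeros)
        = zeros + (if c = '0' then (1 : Int) else 0) := by split_ifs <;> ring
    have ho : (if c = '1' then ones + 1 else ones)
        = ones + (if c = '1' then (1 : Int) else 0) := by split_ifs <;> ring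
    simp only [List.foldl_cons, maxScoreStep]
    rw [ih]
    simp only [List.length_cons, List.range_succ_eq_map, List.foldl_cons, List.foldl_map]
    congr 1
    · funext m k
      simp only [List.take_succ_cons, List.count_cons]
      congr 1
      simp only [beq_iff_eq]
      push_cast
      split_ifs with h1 h2 <;> simp_all <;> try ring
    · simp only [List.take_succ_cons, List.take_zero, List.count_cons, List.count_nil]
      congr 1
      simp only [beq_iff_eq]
      push_cast
      split_ifs with h1 h2 <;> simp_all <;> try ring

-- ===== VERDICT (by name: the statement is the Claim_ definition above) =====
theorem maxScore_spec : Claim_equal_maxScore := by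
  intro s _
  unfold Spec_maxScore maxScore maxScore_alt
  have h0 : ("0" : String).toList = ['0'] := by decide
  have h1 : ("1" : String).toList = ['1'] := by decide
  have hneg : (PySem.Str.slice s none (some (-1))).toList = s.toList.dropLast :=
    PySem.Str.slice_to_neg_one s
  simp only [hneg]
  rw [B_inv]
  set l := s.toList with hl
  have hT : PySem.Str.count s "1" = l.count '1' := by
    rw [PySem.Str.count_eq, h1, count_single]
  simp only [PySem.Str.count_eq, PySem.Str.slice, PySem.Chars.slice, String.toList_ofList,
    h0, h1, count_single]
  rw [PySem.List.pyRange_one]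
  rw [List.foldl_map]
  have hsl : s.length = l.length := String.length_toList.symm
  have hN : (PySem.Str.len s - 1 - 0).toNat = l.dropLast.length := by
    simp [PySem.Str.len_eq, hsl]
  rw [hN]
  apply PySem.List.foldl_congr_mem
  intro m k hk
  have hk' : k < l.length - 1 := by
    have := List.mem_range.mp hk
    simpa [List.length_dropLast] using this
  have htake : l.dropLast.take (k + 1) = l.take (k + 1) := by
    rw [List.dropLast_eq_take, List.take_take]
    congr 1
    omega
  have hslt : PySem.List.slice l none (some (0 + (k : Int) + 1)) = l.take (k + 1) := by
    rw [show (0 + (k : Int) + 1) = ((k + 1 : Nat) : Int) by push_cast; ring,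
      PySem.List.slice_to_natCast]
  have hslf : PySem.List.slice l (some (0 + (k : Int) + 1)) none = l.drop (k + 1) := by
    rw [show (0 + (k : Int) + 1) = ((k + 1 : Nat) : Int) by push_cast; ring,
      PySem.List.slice_from_natCast]
  rw [hslt, hslf, htake]
  have hcnt : l.count '1' = (l.take (k + 1)).count '1' + (l.drop (k + 1)).count '1' := by
    conv_lhs => rw [← List.take_append_drop (k + 1) l]
    rw [List.count_append]
  congr 1
  simp only [← hl]
  omega
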